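-- pv_equiv track=rewrite | github.com/pypi-data/pypi-mirror-373 | packages/romlm/romlm-1.0.3.tar.gz/romlm-1.0.3/src/duplicates.py | get_region_coverage_and_min_index
-- ===== SOURCE A (Python) =====
-- top_region_priority = "world"
--
-- region_priority = ["usa", "europe"]
--
-- def get_region_coverage_and_min_index(tags_list):
--     """
--     Returns (coverage, min_index) where:
--       coverage = number of recognized region tags
--       min_index = the lowest index among recognized tags (or len(region_priority) if none)
--     Example: if tags_list has ["usa", "europe"], coverage=2, min_index=1 ("usa")
--     """
--     # Check if it's a top region priority
--     for t in tags_list: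
--         if t == top_region_priority:
--             return len(region_priority), 0
--     # Check if it's a recognized prioritized region
--     recognized = [r for r in tags_list if r in region_priority]
--     coverage = len(recognized)
--     if coverage == 0:
--         return 0, len(region_priority)
--     # find the lowest region index among them
--     min_i = min(region_priority.index(r) for r in recognized)
--     return coverage, min_i
-- ===== SOURCE B (Python) =====
-- top_region_priority = "world"
--
-- region_priority = ["usa", "europe"]
--
-- def get_region_coverage_and_min_index(tags_list):
--     saw_world = False
--     coverage = 0
--     min_i = len(region_priority)
--     for t in tags_list:
--         if t == top_region_priority:
--             saw_world = True
--         if t in region_priority: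
--             coverage += 1
--             min_i = min(min_i, region_priority.index(t))
--     if saw_world:
--         return len(region_priority), 0
--     if coverage == 0:
--         return 0, len(region_priority)
--     return coverage, min_i
-- ===== Notes on version B (the rewrite author's own statement) =====
-- stated objective: simpler
-- what changed: Replaces A's three traversals (early-return world-check loop, recognized-list comprehension, and min generator over region_priority.index) with one fused pass accumulating (saw_world, coverage, min_i), then a three-way return.
import Mathlib
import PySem

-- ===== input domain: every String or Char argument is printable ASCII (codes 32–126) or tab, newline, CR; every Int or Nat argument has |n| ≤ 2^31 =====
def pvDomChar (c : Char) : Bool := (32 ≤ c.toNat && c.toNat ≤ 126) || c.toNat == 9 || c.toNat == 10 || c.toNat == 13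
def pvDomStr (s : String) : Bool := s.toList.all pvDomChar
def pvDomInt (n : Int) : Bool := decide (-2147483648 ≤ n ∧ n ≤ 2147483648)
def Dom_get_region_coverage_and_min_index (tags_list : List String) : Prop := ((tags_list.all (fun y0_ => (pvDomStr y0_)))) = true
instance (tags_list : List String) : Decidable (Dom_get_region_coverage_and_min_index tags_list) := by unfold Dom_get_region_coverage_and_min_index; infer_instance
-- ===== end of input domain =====

-- B fuses A's three traversals (world-check loop, recognized-filter, min generator) into one
-- accumulation pass tracking (saw_world, coverage, min_i); return value proved equal (objective: simpler).


-- module-level constants shared by both Pythons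
def pvTopRegionPriority : String := "world"
def pvRegionPriority : List String := ["usa", "europe"]

-- ===== PORT A =====
-- the 'for t in tags_list: if t == top: return …' early-return loop
def pvWorldLoop : List String → Option (Int × Int)
  | [] => none
  | t :: rest => if t = pvTopRegionPriority then some ((pvRegionPriority.length : Int), 0) else pvWorldLoop rest

-- region_priority.index(r): .getD 0 is never hit, r is always a member (recognized ⊆ region_priority)
def pvIdx (r : String) : Int := ((PySem.List.index? pvRegionPriority r).getD 0 : Nat)

def get_region_coverage_and_min_index (tags_list : List String) : Int × Int :=
  match pvWorldLoop tags_list with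
  | some v => v
  | none =>
    let recognized := tags_list.filter (fun r => r ∈ pvRegionPriority)
    let coverage : Int := recognized.length
    if coverage = 0 then (0, (pvRegionPriority.length : Int))
    else
      -- min(generator) over a nonempty list; .getD 0 is never hit (recognized ≠ [])
      let min_i : Int := (PySem.List.min? (recognized.map pvIdx) (fun y => y)).getD 0
      (coverage, min_i)

-- ===== PORT B =====
def pvFoldStep (st : Bool × Int × Int) (t : String) : Bool × Int × Int :=
  let w := st.1 || (t = pvTopRegionPriority)
  if t ∈ pvRegionPriority then (w, st.2.1 + 1, min st.2.2 (pvIdx t)) else (w, st.2.1, st.2.2)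

def get_region_coverage_and_min_index_alt (tags_list : List String) : Int × Int :=
  let st := tags_list.foldl pvFoldStep (false, 0, (pvRegionPriority.length : Int))
  if st.1 then ((pvRegionPriority.length : Int), 0)
  else if st.2.1 = 0 then (0, (pvRegionPriority.length : Int))
  else (st.2.1, st.2.2)

-- ===== PRECONDITION & SPEC =====
def Spec_get_region_coverage_and_min_index (tags_list : List String) (out : Int × Int) : Prop := out = get_region_coverage_and_min_index_alt tags_list
instance (tags_list : List String) (out : Int × Int) : Decidable (Spec_get_region_coverage_and_min_index tags_list out) := by unfold Spec_get_region_coverage_and_min_index; infer_instance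

-- ===== CLAIM (what is proved, stated in full; the proofs are below) =====
def Claim_equal_get_region_coverage_and_min_index : Prop := ∀ (tags_list : List String), Dom_get_region_coverage_and_min_index tags_list → Spec_get_region_coverage_and_min_index tags_list (get_region_coverage_and_min_index tags_list)

-- ===== LEMMAS AND PROOFS =====

theorem pvWorldLoop_spec (l : List String) :
    pvWorldLoop l = if l.any (fun t => t = pvTopRegionPriority) then some ((2 : Int), 0) else none := by
  induction l with
  | nil => simp [pvWorldLoop]
  | cons t rest ih =>
    by_cases h : t = pvTopRegionPriority <;> simp [pvWorldLoop, h, ih, pvRegionPriority]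

theorem pvIdx_le_two (r : String) : pvIdx r ≤ 2 := by
  unfold pvIdx
  by_cases h : r ∈ pvRegionPriority
  · simp only [pvRegionPriority, List.mem_cons, List.not_mem_nil, or_false] at h
    rcases h with h | h <;> subst h <;> decide
  · rw [PySem.List.index?_eq_idxOf?, List.idxOf?_eq_none_iff.mpr h]; simp
theorem pvFold_spec (l : List String) (w : Bool) (c m : Int) :
    l.foldl pvFoldStep (w, c, m) =
      (w || l.any (fun t => t = pvTopRegionPriority),
       c + ((l.filter (fun r => r ∈ pvRegionPriority)).length : Int),
       ((l.filter (fun r => r ∈ pvRegionPriority)).map pvIdx).foldl min m) := by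
  induction l generalizing w c m with
  | nil => simp
  | cons t rest ih =>
    by_cases h : t ∈ pvRegionPriority
    · simp [pvFoldStep, h, ih, Bool.or_assoc]; ring_nf
    · simp [pvFoldStep, h, ih, Bool.or_assoc]
theorem foldl_min_two (x : Int) (t : List Int) (hx : x ≤ 2) :
    (x :: t).foldl min 2 = t.foldl min x := by
  simp [List.foldl, min_eq_right hx]

theorem min?_id_getD (x : Int) (t : List Int) :
    (PySem.List.min? (x :: t) (fun y => y)).getD 0 = t.foldl min x := by
  rw [PySem.List.min?_id_cons]; rfl

-- ===== VERDICT (by name: the statement is the Claim_ definition above) =====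
theorem get_region_coverage_and_min_index_spec : Claim_equal_get_region_coverage_and_min_index := by
  intro l _
  show get_region_coverage_and_min_index l = get_region_coverage_and_min_index_alt l
  unfold get_region_coverage_and_min_index get_region_coverage_and_min_index_alt
  rw [pvWorldLoop_spec, pvFold_spec]
  have hlen : ((pvRegionPriority.length : Int)) = 2 := by norm_num [pvRegionPriority]
  rw [hlen]
  by_cases hw : l.any (fun t => t = pvTopRegionPriority)
  · simp [hw]
  · simp only [hw, Bool.false_or]
    cases hrec : l.filter (fun r => r ∈ pvRegionPriority) with
    | nil => simp
    | cons x rest =>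
      have hx : pvIdx x ≤ 2 := pvIdx_le_two x
      simp only [List.map_cons, List.length_cons, min?_id_getD,
        foldl_min_two (pvIdx x) (rest.map pvIdx) hx]
      have hne : ((rest.length : Int) + 1) ≠ 0 := by positivity
      simp [hne]
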